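-- pv_equiv track=rewrite | github.com/bleedblack1/DNA-SEQUENCE-CLASSIFIER | data_collection/scripts/preprocess.py | calculate_homopolymer_runs
-- ===== SOURCE A (Python) =====
-- def calculate_homopolymer_runs(seq: str, threshold: int = 5) -> int:
--     """
--     Count homopolymer runs (same base repeated > threshold times).
--
--     Indicates potential quality issues.
--
--     Args:
--         seq: Input sequence
--         threshold: If same base repeats > this, count as run
--
--     Returns:
--         Number of long homopolymer runs
--     """
--     runs = 0
--     max_run = 1
--     current_base = None
--
--     for base in seq:
--         if base == current_base:
--             max_run += 1
--         else:
--             if max_run > threshold: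
--                 runs += 1
--             current_base = base
--             max_run = 1
--
--     if max_run > threshold:
--         runs += 1
--
--     return runs
-- ===== SOURCE B (Python) =====
-- def calculate_homopolymer_runs(seq: str, threshold: int = 5) -> int:
--     """Count maximal runs of identical characters longer than threshold.
--
--     A position i is the start of a qualifying run iff it is a run boundary
--     (i == 0 or the previous character differs) and the next `threshold`
--     positions all exist and hold the same character.
--     """
--     n = len(seq)
--     return sum(
--         1
--         for i in range(n)
--         if (i == 0 or seq[i - 1] != seq[i])
--         and all(j < n and seq[j] == seq[i] for j in range(i + 1, i + threshold + 1))
--     )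
-- ===== Notes on version B (the rewrite author's own statement) =====
-- stated objective: alternative
-- what changed: Replaces A's streaming run-length state machine (current_base/max_run accumulators) with a positional characterisation: count indices i that are run boundaries and whose next `threshold` positions all exist and repeat seq[i], so no run length is ever computed.
-- intended difference: For threshold < 1 (a degenerate cutoff), A's initial state (current_base=None, max_run=1) makes it count one phantom run of length 1 that is not in the sequence - 1 on the empty string, true-count+1 otherwise - while B returns the actual number of maximal runs longer than threshold, which is the intended count. — e.g. on calculate_homopolymer_runs("AA", 0): A returns 2, B returns 1
import Mathlib
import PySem

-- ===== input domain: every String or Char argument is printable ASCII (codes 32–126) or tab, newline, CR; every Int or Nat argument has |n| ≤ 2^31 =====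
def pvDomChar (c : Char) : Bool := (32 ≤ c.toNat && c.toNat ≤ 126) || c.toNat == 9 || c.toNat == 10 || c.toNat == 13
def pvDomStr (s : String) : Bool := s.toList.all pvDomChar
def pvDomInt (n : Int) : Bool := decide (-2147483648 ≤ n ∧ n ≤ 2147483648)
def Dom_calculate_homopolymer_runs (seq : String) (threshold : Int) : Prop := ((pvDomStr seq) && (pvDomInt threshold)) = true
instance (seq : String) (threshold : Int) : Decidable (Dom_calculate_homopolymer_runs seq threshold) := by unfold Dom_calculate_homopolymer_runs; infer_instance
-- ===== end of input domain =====

-- B replaces A's streaming run-length state machine with a positional characterisation (count run-boundary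
-- indices whose next `threshold` positions exist and repeat the character); for threshold < 1 A counts a
-- phantom initial run of length 1 and B returns the intended count (see D_).


-- ===== PORT A =====
-- A's for-loop over the characters, carrying (runs, max_run, current_base) exactly as the Python does.
def pvALoop (threshold : Int) : List Char → Int → Int → Option Char → Int
  | [], runs, max_run, _ =>
    if max_run > threshold then runs + 1 else runs
  | b :: rest, runs, max_run, cur =>
    if some b == cur then
      pvALoop threshold rest runs (max_run + 1) cur
    else
      pvALoop threshold rest (if max_run > threshold then runs + 1 else runs) 1 (some b)

def calculate_homopolymer_runs (seq : String) (threshold : Int) : Int :=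
  pvALoop threshold seq.toList 0 1 none

-- ===== PORT B =====
-- all(j < n and seq[j] == seq[i] for j in range(i + 1, i + threshold + 1)):
-- the generator is lazy and `all` short-circuits at the first false, so it is ported as a
-- bounded recursion over j that stops at the first failing conjunct (hence at most n+1 steps);
-- seq[j]/seq[i] are in range whenever evaluated (the j < n test short-circuits), so getD is exact.
def pvWindowAll (cs : List Char) (ci : Char) (stop : Int) (j : Int) : Bool :=
  if j < stop then
    if decide (j < (cs.length : Int)) && (PySem.List.pyGetD cs j ' ' == ci) then
      pvWindowAll cs ci stop (j + 1)
    else false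
  else true
termination_by (stop - j).toNat
decreasing_by omega

def pvWindowOK (cs : List Char) (threshold : Int) (i : Nat) : Bool :=
  pvWindowAll cs (cs.getD i ' ') ((i : Int) + threshold + 1) ((i : Int) + 1)

-- (i == 0 or seq[i-1] != seq[i]) and all(...)
def pvCondB (cs : List Char) (threshold : Int) (i : Nat) : Bool :=
  (decide (i = 0) || !(cs.getD (i - 1) ' ' == cs.getD i ' ')) && pvWindowOK cs threshold i

-- sum(1 for i in range(n) if ...)
def calculate_homopolymer_runs_alt (seq : String) (threshold : Int) : Int :=
  ((((List.range seq.toList.length).filter (pvCondB seq.toList threshold)).length : Nat) : Int)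

-- ===== PRECONDITION & SPEC =====
-- For threshold < 1 (a degenerate cutoff), A's initial state (current_base=None, max_run=1) makes it count
-- one phantom run of length 1 that is not in the sequence — 1 on the empty string, true-count+1 otherwise —
-- while B returns the actual number of maximal runs longer than threshold, which is the intended count.
def D_calculate_homopolymer_runs (seq : String) (threshold : Int) : Prop := threshold < 1
instance (seq : String) (threshold : Int) : Decidable (D_calculate_homopolymer_runs seq threshold) := by
  unfold D_calculate_homopolymer_runs; infer_instance

def Spec_calculate_homopolymer_runs (seq : String) (threshold : Int) (out : Int) : Prop :=
  ¬ D_calculate_homopolymer_runs seq threshold → out = calculate_homopolymer_runs_alt seq threshold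
instance (seq : String) (threshold : Int) (out : Int) : Decidable (Spec_calculate_homopolymer_runs seq threshold out) := by
  unfold Spec_calculate_homopolymer_runs; infer_instance

def pvDiffWitness_calculate_homopolymer_runs : String × Int := ("AA", 0)
def pvDiffWitnessOut_calculate_homopolymer_runs : Int × Int := (2, 1)

-- ===== CLAIM (what is proved, stated in full; the proofs are below) =====
def Claim_unchanged_calculate_homopolymer_runs : Prop := ∀ (seq : String) (threshold : Int), Dom_calculate_homopolymer_runs seq threshold → Spec_calculate_homopolymer_runs seq threshold (calculate_homopolymer_runs seq threshold)
def Claim_changed_calculate_homopolymer_runs : Prop := Dom_calculate_homopolymer_runs (pvDiffWitness_calculate_homopolymer_runs.1) (pvDiffWitness_calculate_homopolymer_runs.2) ∧ D_calculate_homopolymer_runs (pvDiffWitness_calculate_homopolymer_runs.1) (pvDiffWitness_calculate_homopolymer_runs.2) ∧ calculate_homopolymer_runs (pvDiffWitness_calculate_homopolymer_runs.1) (pvDiffWitness_calculate_homopolymer_runs.2) = pvDiffWitnessOut_calculate_homopolymer_runs.1 ∧ calculate_homopolymer_runs_alt (pvDiffWitness_calculate_homopolymer_runs.1) (pvDiffWitness_calculate_homopolymer_runs.2)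 = pvDiffWitnessOut_calculate_homopolymer_runs.2 ∧ pvDiffWitnessOut_calculate_homopolymer_runs.1 ≠ pvDiffWitnessOut_calculate_homopolymer_runs.2
def Claim_exact_calculate_homopolymer_runs : Prop := ∀ (seq : String) (threshold : Int), Dom_calculate_homopolymer_runs seq threshold → D_calculate_homopolymer_runs seq threshold → calculate_homopolymer_runs seq threshold ≠ calculate_homopolymer_runs_alt seq threshold

-- ===== LEMMAS AND PROOFS =====

-- ---- run/group machinery (proof-only) ----
def pvGroups : List Char → List (Char × Nat)
  | [] => []
  | c :: rest =>
    match pvGroups rest with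
    | [] => [(c, 1)]
    | (d, n) :: gs => if c = d then (c, n + 1) :: gs else (c, 1) :: (d, n) :: gs

def pvCount (threshold : Int) (gs : List (Char × Nat)) : Int :=
  ((gs.filter (fun g => decide ((g.2 : Int) > threshold))).length : Int)

theorem pvCount_nil (threshold : Int) : pvCount threshold [] = 0 := rfl

theorem pvCount_cons (threshold : Int) (c : Char) (n : Nat) (gs : List (Char × Nat)) :
    pvCount threshold ((c, n) :: gs) =
      (if (n : Int) > threshold then 1 else 0) + pvCount threshold gs := by
  simp only [pvCount, List.filter_cons]
  by_cases h : (n : Int) > threshold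
  · simp [h]; ring
  · simp [h]

theorem pvGroups_head : ∀ (b : Char) (rest : List Char),
    ∃ n gs, pvGroups (b :: rest) = (b, n) :: gs := by
  intro b rest
  cases h : pvGroups rest with
  | nil => exact ⟨1, [], by simp [pvGroups, h]⟩
  | cons p gs =>
    obtain ⟨d, n⟩ := p
    by_cases hbd : b = d
    · exact ⟨n + 1, gs, by simp [pvGroups, h, hbd]⟩
    · exact ⟨1, (d, n) :: gs, by simp [pvGroups, h, hbd]⟩

theorem pvGroups_replicate (c : Char) (l : List Char) (hl : ∀ b ∈ l.head?, b ≠ c) :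
    ∀ j : Nat, pvGroups (List.replicate (j + 1) c ++ l) = (c, j + 1) :: pvGroups l := by
  intro j
  induction j with
  | zero =>
    cases l with
    | nil => simp [pvGroups]
    | cons b rest =>
      obtain ⟨n, gs, hg⟩ := pvGroups_head b rest
      have hbc : b ≠ c := hl b (by simp)
      have hcb : c ≠ b := Ne.symm hbc
      have hu : pvGroups (c :: b :: rest) =
          match pvGroups (b :: rest) with
          | [] => [(c, 1)]
          | (d, n) :: gs => if c = d then (c, n + 1) :: gs else (c, 1) :: (d, n) :: gs := rfl
      rw [show List.replicate (0 + 1) c ++ b :: rest = c :: b :: rest from rfl, hu, hg]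
      simp [hcb]
  | succ j ih =>
    have : List.replicate (j + 1 + 1) c ++ l = c :: (List.replicate (j + 1) c ++ l) := by
      simp [List.replicate_succ]
    rw [this, pvGroups, ih]
    simp

-- ---- A's loop against the group decomposition ----
def pvB (threshold : Int) (l : List Char) : Int := pvCount threshold (pvGroups l)

theorem pvALoop_spec (threshold : Int) (l : List Char) :
    ∀ (k : Nat) (c : Char) (runs : Int), 1 ≤ k →
      pvALoop threshold l runs (k : Int) (some c) =
        runs + pvB threshold (List.replicate k c ++ l) := by
  induction l with
  | nil =>
    intro k c runs hk
    obtain ⟨j, rfl⟩ : ∃ j, k = j + 1 := ⟨k - 1, (Nat.succ_pred_eq_of_pos hk).symm⟩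
    have hg : pvGroups (List.replicate (j + 1) c ++ ([] : List Char)) = [(c, j + 1)] := by
      rw [pvGroups_replicate c [] (by simp) j]; rfl
    rw [show pvALoop threshold [] runs ((j + 1 : Nat) : Int) (some c) =
          if ((j + 1 : Nat) : Int) > threshold then runs + 1 else runs from rfl,
        pvB, hg, pvCount_cons, pvCount_nil]
    split_ifs <;> ring
  | cons b rest ih =>
    intro k c runs hk
    by_cases hbc : b = c
    · subst hbc
      have hstep : pvALoop threshold (b :: rest) runs (k : Int) (some b) =
          pvALoop threshold rest runs ((k : Int) + 1) (some b) := by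
        simp [pvALoop]
      have h := ih (k + 1) b runs (by omega)
      push_cast at h
      rw [hstep, h]
      have : List.replicate (k + 1) b ++ rest = List.replicate k b ++ b :: rest := by
        rw [List.replicate_succ']; simp
      rw [this]
    · have hne : (some b == some c) = false := by simp [hbc]
      have hstep : pvALoop threshold (b :: rest) runs (k : Int) (some c) =
          pvALoop threshold rest (if (k : Int) > threshold then runs + 1 else runs) 1 (some b) := by
        simp [pvALoop, hne]
      have h := ih 1 b (if (k : Int) > threshold then runs + 1 else runs) (by omega)
      push_cast at h
      simp only [List.singleton_append] at h
      rw [hstep, h]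
      obtain ⟨j, rfl⟩ : ∃ j, k = j + 1 := ⟨k - 1, (Nat.succ_pred_eq_of_pos hk).symm⟩
      have hsplit : pvGroups (List.replicate (j + 1) c ++ b :: rest) = (c, j + 1) :: pvGroups (b :: rest) :=
        pvGroups_replicate c (b :: rest) (by intro x hx; simp at hx; subst hx; exact hbc) j
      simp only [pvB]
      rw [hsplit, pvCount_cons]
      split_ifs <;> ring

-- ---- B's index count against the group decomposition ----

-- the head-run splitter: c :: l = replicate (fst+1) c ++ snd, snd not starting with c
def pvRun (c : Char) : List Char → Nat × List Char
  | [] => (0, [])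
  | b :: l => if b = c then ((pvRun c l).1 + 1, (pvRun c l).2) else (0, b :: l)

theorem pvRun_eq (c : Char) : ∀ l : List Char,
    List.replicate (pvRun c l).1 c ++ (pvRun c l).2 = l := by
  intro l
  induction l with
  | nil => rfl
  | cons b l ih =>
    by_cases h : b = c
    · subst h; simp [pvRun, List.replicate_succ, ih]
    · simp [pvRun, h]

theorem pvRun_head (c : Char) : ∀ l : List Char, ∀ b ∈ (pvRun c l).2.head?, b ≠ c := by
  intro l
  induction l with
  | nil => intro b hb; simp [pvRun] at hb
  | cons a l ih =>
    by_cases h : a = c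
    · subst h; simpa [pvRun] using ih
    · intro b hb; simp [pvRun, h] at hb; subst hb; exact h

theorem pvRun_len (c : Char) : ∀ l : List Char, (pvRun c l).2.length ≤ l.length := by
  intro l
  induction l with
  | nil => simp [pvRun]
  | cons a l ih =>
    by_cases h : a = c
    · subst h
      have h2 : (pvRun a (a :: l)).2 = (pvRun a l).2 := by simp [pvRun]
      rw [h2]; simp only [List.length_cons]; omega
    · simp [pvRun, h]

-- B's nat-valued count
def pvF (threshold : Int) (cs : List Char) : Nat :=
  (List.range cs.length).countP (pvCondB cs threshold)

theorem pvF_eq_alt (seq : String) (threshold : Int) :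
    calculate_homopolymer_runs_alt seq threshold = ((pvF threshold seq.toList : Nat) : Int) := by
  simp [calculate_homopolymer_runs_alt, pvF, List.countP_eq_length_filter]

-- the short-circuiting window loop as a quantified statement
theorem pvWindowAll_iff (cs : List Char) (ci : Char) (stop : Int) :
    ∀ (n : Nat) (j : Int), (stop - j).toNat ≤ n →
      (pvWindowAll cs ci stop j = true ↔
        ∀ x : Int, j ≤ x → x < stop → x < (cs.length : Int) ∧ PySem.List.pyGetD cs x ' ' = ci) := by
  intro n
  induction n with
  | zero =>
    intro j hn
    rw [pvWindowAll, if_neg (by omega : ¬ j < stop)]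
    constructor
    · intro _ x h1 h2; omega
    · intro _; rfl
  | succ n ih =>
    intro j hn
    rw [pvWindowAll]
    by_cases hjs : j < stop
    · rw [if_pos hjs]
      by_cases hc : (decide (j < (cs.length : Int)) && (PySem.List.pyGetD cs j ' ' == ci)) = true
      · rw [if_pos hc, ih (j + 1) (by omega)]
        rw [Bool.and_eq_true, decide_eq_true_eq, beq_iff_eq] at hc
        constructor
        · intro h x h1 h2
          by_cases hxj : x = j
          · subst hxj; exact hc
          · exact h x (by omega) h2
        · intro h x h1 h2; exact h x (by omega) h2
      · rw [if_neg hc]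
        rw [Bool.and_eq_true, decide_eq_true_eq, beq_iff_eq] at hc
        constructor
        · intro hff; simp at hff
        · intro h; exact absurd (h j le_rfl hjs) hc
    · rw [if_neg hjs]
      constructor
      · intro _ x h1 h2; omega
      · intro _; rfl

theorem pvWindowOK_iff (cs : List Char) (t : Int) (i : Nat) :
    pvWindowOK cs t i = true ↔
      ∀ j : Int, (i : Int) + 1 ≤ j → j < (i : Int) + t + 1 →
        j < (cs.length : Int) ∧ cs.getD j.toNat ' ' = cs.getD i ' ' := by
  unfold pvWindowOK
  rw [pvWindowAll_iff cs (cs.getD i ' ') ((i : Int) + t + 1)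
        ((i : Int) + t + 1 - ((i : Int) + 1)).toNat ((i : Int) + 1) le_rfl]
  constructor
  · intro h j h1 h2
    obtain ⟨hlt, heq⟩ := h j h1 h2
    refine ⟨hlt, ?_⟩
    rw [PySem.List.pyGetD_of_nonneg cs ' ' (by omega : (0:Int) ≤ j)] at heq
    exact heq
  · intro h j h1 h2
    obtain ⟨hlt, heq⟩ := h j h1 h2
    refine ⟨hlt, ?_⟩
    rw [PySem.List.pyGetD_of_nonneg cs ' ' (by omega : (0:Int) ≤ j), heq]

-- getD over a replicate-prefixed list
theorem pvGetD_left (c : Char) (rest : List Char) (k i : Nat) (hik : i < k) :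
    (List.replicate k c ++ rest).getD i ' ' = c := by
  rw [List.getD_eq_getElem?_getD, List.getElem?_append_left (by simpa using hik),
      List.getElem?_replicate]
  simp [hik]

theorem pvGetD_right (c : Char) (rest : List Char) (k i : Nat) :
    (List.replicate k c ++ rest).getD (k + i) ' ' = rest.getD i ' ' := by
  rw [List.getD_eq_getElem?_getD, List.getD_eq_getElem?_getD,
      List.getElem?_append_right (by simp)]
  simp

-- pvCondB at index 0 of a run block
theorem pvCondB_zero (t : Int) (c : Char) (rest : List Char)
    (hh : ∀ b ∈ rest.head?, b ≠ c) (k : Nat) (hk : 1 ≤ k) :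
    pvCondB (List.replicate k c ++ rest) t 0 = decide ((k : Int) > t) := by
  have hw : pvWindowOK (List.replicate k c ++ rest) t 0 = true ↔ (k : Int) > t := by
    rw [pvWindowOK_iff]
    constructor
    · intro h
      by_contra hkt
      have hkk : 1 ≤ (k : Int) := by exact_mod_cast hk
      obtain ⟨hlt, heq⟩ := h (k : Int) (by omega) (by omega)
      rw [Int.toNat_natCast] at heq
      have hgr : (List.replicate k c ++ rest).getD k ' ' = rest.getD 0 ' ' := by
        simpa using pvGetD_right c rest k 0
      rw [hgr] at heq
      cases rest with
      | nil => simp at hlt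
      | cons b l =>
        have : b ≠ c := hh b (by simp)
        rw [pvGetD_left c (b :: l) k 0 (by omega)] at heq
        simp [List.getD] at heq
        exact this heq
    · intro hkt j h1 h2
      have hj : 0 ≤ j ∧ j < (k : Int) := by omega
      have hjk : j.toNat < k := by omega
      constructor
      · simp only [List.length_append, List.length_replicate]; push_cast; omega
      · rw [pvGetD_left c rest k j.toNat hjk, pvGetD_left c rest k 0 (by omega)]
  unfold pvCondB
  simp only [decide_true, Bool.true_or, Bool.true_and]
  by_cases hkt : (k : Int) > t
  · simp [hkt, hw.mpr hkt]
  · simp only [hkt, decide_false]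
    rw [← Bool.not_eq_true]
    intro hc
    exact hkt (hw.mp hc)

-- pvCondB inside a run block (not a boundary)
theorem pvCondB_mid (t : Int) (c : Char) (rest : List Char) (k i : Nat)
    (h1 : 1 ≤ i) (h2 : i < k) :
    pvCondB (List.replicate k c ++ rest) t i = false := by
  unfold pvCondB
  have hprev : (List.replicate k c ++ rest).getD (i - 1) ' ' = c :=
    pvGetD_left c rest k (i - 1) (by omega)
  have hcur : (List.replicate k c ++ rest).getD i ' ' = c :=
    pvGetD_left c rest k i h2
  rw [hprev, hcur]
  simp [show i ≠ 0 by omega]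

-- pvCondB past the run block = pvCondB of the tail
theorem pvCondB_shift (t : Int) (c : Char) (rest : List Char)
    (hh : ∀ b ∈ rest.head?, b ≠ c) (k : Nat) (hk : 1 ≤ k) (i : Nat) (hi : i < rest.length) :
    pvCondB (List.replicate k c ++ rest) t (k + i) = pvCondB rest t i := by
  have hwin : pvWindowOK (List.replicate k c ++ rest) t (k + i) = pvWindowOK rest t i := by
    rw [Bool.eq_iff_iff, pvWindowOK_iff, pvWindowOK_iff]
    constructor
    · intro h j h1 h2
      obtain ⟨hlt, heq⟩ := h (j + (k : Int)) (by push_cast; omega) (by push_cast; omega)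
      have h0 : 0 ≤ j := by omega
      have htn : (j + (k : Int)).toNat = k + j.toNat := by omega
      rw [htn, pvGetD_right c rest k j.toNat, pvGetD_right c rest k i] at heq
      have hlen2 : (List.replicate k c ++ rest).length = k + rest.length := by simp
      rw [hlen2] at hlt
      refine ⟨by push_cast at hlt ⊢; omega, heq⟩
    · intro h j h1 h2
      obtain ⟨hlt, heq⟩ := h (j - (k : Int)) (by push_cast; omega) (by push_cast; omega)
      have htn : j.toNat = k + (j - (k : Int)).toNat := by omega
      rw [htn, pvGetD_right c rest k (j - (k : Int)).toNat, pvGetD_right c rest k i]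
      refine ⟨by simp only [List.length_append, List.length_replicate]; push_cast at hlt ⊢; omega, heq⟩
  have hbnd : (decide (k + i = 0) ||
      !((List.replicate k c ++ rest).getD (k + i - 1) ' ' == (List.replicate k c ++ rest).getD (k + i) ' ')) =
      (decide (i = 0) || !(rest.getD (i - 1) ' ' == rest.getD i ' ')) := by
    cases i with
    | zero =>
      cases rest with
      | nil => simp at hi
      | cons b l =>
        have hbc : b ≠ c := hh b (by simp)
        have hprev : (List.replicate k c ++ b :: l).getD (k + 0 - 1) ' ' = c := by
          rw [show k + 0 - 1 = k - 1 by omega]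
          exact pvGetD_left c (b :: l) k (k - 1) (by omega)
        have hcur : (List.replicate k c ++ b :: l).getD (k + 0) ' ' = b := by
          simpa using pvGetD_right c (b :: l) k 0
        rw [hprev, hcur]
        simp [Ne.symm hbc, show k + 0 ≠ 0 by omega]
    | succ m =>
      have hprev : (List.replicate k c ++ rest).getD (k + (m + 1) - 1) ' ' = rest.getD m ' ' := by
        rw [show k + (m + 1) - 1 = k + m by omega]; exact pvGetD_right c rest k m
      have hcur : (List.replicate k c ++ rest).getD (k + (m + 1)) ' ' = rest.getD (m + 1) ' ' :=
        pvGetD_right c rest k (m + 1)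
      rw [hprev, hcur]
      simp [show k + (m + 1) ≠ 0 by omega, show m + 1 ≠ 0 by omega]
  unfold pvCondB
  rw [hwin, hbnd]

-- peeling one maximal run off B's count
theorem pvF_decomp (t : Int) (c : Char) (rest : List Char)
    (hh : ∀ b ∈ rest.head?, b ≠ c) (k : Nat) (hk : 1 ≤ k) :
    pvF t (List.replicate k c ++ rest) =
      (if (k : Int) > t then 1 else 0) + pvF t rest := by
  set L := List.replicate k c ++ rest with hL
  have hlen : L.length = k + rest.length := by simp [hL]
  have hsplit : List.range L.length = List.range k ++ (List.range rest.length).map (k + ·) := by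
    rw [hlen, List.range_add]
  unfold pvF
  rw [hsplit, List.countP_append, List.countP_map]
  have hfirst : (List.range k).countP (pvCondB L t) = if (k : Int) > t then 1 else 0 := by
    obtain ⟨j, rfl⟩ : ∃ j, k = j + 1 := ⟨k - 1, (Nat.succ_pred_eq_of_pos hk).symm⟩
    rw [List.range_succ_eq_map, List.countP_cons, List.countP_map]
    have hzero : (List.range j).countP (pvCondB L t ∘ Nat.succ) = 0 := by
      rw [List.countP_eq_zero]
      intro a ha
      rw [List.mem_range] at ha
      simp only [Function.comp_apply]
      rw [pvCondB_mid t c rest (j + 1) (a + 1) (by omega) (by omega)]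
      simp
    rw [hzero, pvCondB_zero t c rest hh (j + 1) (by omega)]
    by_cases hkt : ((j + 1 : Nat) : Int) > t <;> simp [hkt]
  have hsecond : (List.range rest.length).countP (pvCondB L t ∘ (k + ·)) =
      (List.range rest.length).countP (pvCondB rest t) := by
    apply List.countP_congr
    intro i hi
    rw [List.mem_range] at hi
    simp only [Function.comp_apply]
    rw [pvCondB_shift t c rest hh k hk i hi]
  rw [hfirst, hsecond]

-- B's count = the group count, by strong induction peeling maximal runs
theorem pvF_eq_count (t : Int) : ∀ (n : Nat) (cs : List Char), cs.length ≤ n →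
    ((pvF t cs : Nat) : Int) = pvB t cs := by
  intro n
  induction n with
  | zero =>
    intro cs h
    have : cs = [] := List.eq_nil_of_length_eq_zero (by omega)
    subst this; rfl
  | succ n ih =>
    intro cs h
    cases cs with
    | nil => rfl
    | cons c l =>
      have hdec : c :: l = List.replicate ((pvRun c l).1 + 1) c ++ (pvRun c l).2 := by
        rw [List.replicate_succ, List.cons_append, pvRun_eq]
      have hh := pvRun_head c l
      have hlen : (pvRun c l).2.length ≤ n := by
        have := pvRun_len c l; simp at h; omega
      rw [hdec, pvF_decomp t c (pvRun c l).2 hh ((pvRun c l).1 + 1) (by omega),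
          pvB, pvGroups_replicate c (pvRun c l).2 hh (pvRun c l).1, pvCount_cons, ← pvB,
          ← ih (pvRun c l).2 hlen]
      push_cast
      split_ifs <;> ring

theorem pvB_eq_alt (seq : String) (threshold : Int) :
    calculate_homopolymer_runs_alt seq threshold = pvB threshold seq.toList := by
  rw [pvF_eq_alt]
  exact pvF_eq_count threshold seq.toList.length seq.toList le_rfl

-- A's closed form: B's count plus the phantom initial run (length 1) when 1 > threshold.
theorem pvA_closed (seq : String) (threshold : Int) :
    calculate_homopolymer_runs seq threshold =
      (if 1 > threshold then 1 else 0) + calculate_homopolymer_runs_alt seq threshold := by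
  rw [pvB_eq_alt]
  unfold calculate_homopolymer_runs
  cases hl : seq.toList with
  | nil =>
    simp only [pvALoop, pvB, pvGroups, pvCount]
    split_ifs <;> simp
  | cons b rest =>
    have hnone : (some b == (none : Option Char)) = false := rfl
    have hstep : pvALoop threshold (b :: rest) 0 1 none =
        pvALoop threshold rest (if (1 : Int) > threshold then 0 + 1 else 0) 1 (some b) := by
      simp [pvALoop, hnone]
    have h := pvALoop_spec threshold rest 1 b (if (1 : Int) > threshold then 0 + 1 else 0) (by omega)
    push_cast at h
    simp only [List.singleton_append] at h
    simp only [zero_add] at hstep h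
    rw [hstep, h]

-- ===== VERDICT (by name: the statement is the Claim_ definition above) =====
theorem calculate_homopolymer_runs_spec : Claim_unchanged_calculate_homopolymer_runs := by
  intro seq threshold _ hD
  unfold D_calculate_homopolymer_runs at hD
  rw [pvA_closed, if_neg (by omega : ¬ ((1 : Int) > threshold)), zero_add]

theorem calculate_homopolymer_runs_changed : Claim_changed_calculate_homopolymer_runs := by
  unfold Claim_changed_calculate_homopolymer_runs
  -- the B port recurses by well-founded recursion, which `decide` cannot unfold;
  -- evaluate it through its proved group-count characterisation instead.
  refine ⟨by decide, by decide, by decide, ?_, by decide⟩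
  rw [show pvDiffWitness_calculate_homopolymer_runs.1 = "AA" from rfl,
      show pvDiffWitness_calculate_homopolymer_runs.2 = 0 from rfl,
      pvB_eq_alt]
  decide

theorem calculate_homopolymer_runs_tight : Claim_exact_calculate_homopolymer_runs := by
  intro seq threshold _ hD
  unfold D_calculate_homopolymer_runs at hD
  rw [pvA_closed, if_pos (by omega : (1 : Int) > threshold)]
  omega
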